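-- pv_equiv track=rewrite | github.com/YukiMurakami/hoshizukuri_game | hoshizukuri_game/utils/other_util.py | _make_permutation_without_itertools
-- ===== SOURCE A (Python) =====
-- def _make_permutation_without_itertools(candidates, count):
--     queue = [[[], candidates]]
--     while len(queue[0][1]) > len(candidates) - count:
--         next_queue = []
--         for item in queue:
--             for cand in list(set(item[1])):
--                 now_list = list(item[0])
--                 next_list = now_list + [cand]
--                 next_candidates = list(item[1])
--                 next_candidates.remove(cand)
--                 next_queue.append([next_list, next_candidates])
--         queue = next_queue
--     return [n[0] for n in queue]
-- ===== SOURCE B (Python) =====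
-- def _make_permutation_without_itertools(candidates, count):
--     limit = len(candidates) - count
--
--     def rec(chosen, remaining):
--         if len(remaining) <= limit:
--             return [chosen]
--         out = []
--         for cand in list(set(remaining)):
--             rest = list(remaining)
--             rest.remove(cand)
--             out.extend(rec(chosen + [cand], rest))
--         return out
--
--     return rec([], candidates)
-- ===== Notes on version B (the rewrite author's own statement) =====
-- stated objective: alternative
-- what changed: A's explicit breadth-first queue of [chosen, remaining] pairs, rebuilt level by level, is replaced by a recursive depth-first helper rec(chosen, remaining) that expands children in the same list(set(remaining)) order, so the leaf order coincides with A's final queue order.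
import Mathlib
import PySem

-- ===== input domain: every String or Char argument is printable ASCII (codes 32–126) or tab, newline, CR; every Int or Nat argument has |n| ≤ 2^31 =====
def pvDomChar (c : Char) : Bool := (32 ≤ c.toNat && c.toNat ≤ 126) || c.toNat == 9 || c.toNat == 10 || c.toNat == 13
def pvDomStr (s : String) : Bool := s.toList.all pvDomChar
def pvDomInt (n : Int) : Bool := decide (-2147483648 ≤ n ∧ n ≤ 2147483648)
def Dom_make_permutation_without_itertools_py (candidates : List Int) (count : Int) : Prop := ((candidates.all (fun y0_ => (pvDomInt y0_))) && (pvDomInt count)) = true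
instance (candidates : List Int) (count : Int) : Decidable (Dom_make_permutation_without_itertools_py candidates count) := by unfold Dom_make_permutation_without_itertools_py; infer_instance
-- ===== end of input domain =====

-- B replaces A's breadth-first queue with a depth-first recursion over (chosen, remaining); same values.

-- ===== PORT A =====
-- one pass of A's while-body: both 'for' loops, appending [next_list, next_candidates] to next_queue
def pvStepA (queue : List (List Int × List Int)) : List (List Int × List Int) :=
  queue.foldl (fun next_queue item =>
    (PySem.Set.ofList item.2).foldl (fun nq cand =>
      nq ++ [(item.1 ++ [cand], ((PySem.List.remove? item.2 cand).getD item.2))]) next_queue) []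

-- A's while-loop; the fuel only makes it total (candidates.length + 2 iterations always suffice);
-- queue.head? = none is Python's IndexError on queue[0] (outside Pre_)
def pvLoopA (candidates : List Int) (count : Int) : Nat → List (List Int × List Int) → List (List Int × List Int)
  | 0, queue => queue
  | fuel+1, queue =>
    match queue.head? with
    | none => []
    | some item0 =>
      if PySem.List.len item0.2 > PySem.List.len candidates - count then
        pvLoopA candidates count fuel (pvStepA queue)
      else queue

def make_permutation_without_itertools_py (candidates : List Int) (count : Int) : List (List Int) :=
  (pvLoopA candidates count (candidates.length + 2) [([], candidates)]).map Prod.fst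

-- ===== PORT B =====
-- Source B's rec(chosen, remaining); the fuel only makes it total (recursion depth ≤ candidates.length + 1)
def pvRecB (limit : Int) : Nat → List Int → List Int → List (List Int)
  | 0, _, _ => []
  | fuel+1, chosen, remaining =>
    if PySem.List.len remaining ≤ limit then [chosen]
    else (PySem.Set.ofList remaining).foldl
      (fun out cand =>
        out ++ pvRecB limit fuel (chosen ++ [cand]) ((PySem.List.remove? remaining cand).getD remaining)) []

def make_permutation_without_itertools_py_alt (candidates : List Int) (count : Int) : List (List Int) :=
  pvRecB (PySem.List.len candidates - count) (candidates.length + 1) [] candidates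

-- ===== PRECONDITION & SPEC =====
-- Pre_ excludes exactly count > len(candidates), where A's queue empties and queue[0] raises IndexError
def Pre_make_permutation_without_itertools_py (candidates : List Int) (count : Int) : Prop :=
  count ≤ (candidates.length : Int)
instance (candidates : List Int) (count : Int) : Decidable (Pre_make_permutation_without_itertools_py candidates count) := by unfold Pre_make_permutation_without_itertools_py; infer_instance

def pvWitness_make_permutation_without_itertools_py : List Int × Int := ([1, 2, 3], 2)

def Spec_make_permutation_without_itertools_py (candidates : List Int) (count : Int) (out : List (List Int)) : Prop := out = make_permutation_without_itertools_py_alt candidates count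
instance (candidates : List Int) (count : Int) (out : List (List Int)) : Decidable (Spec_make_permutation_without_itertools_py candidates count out) := by unfold Spec_make_permutation_without_itertools_py; infer_instance

-- ===== CLAIM (what is proved, stated in full; the proofs are below) =====
def Claim_equal_make_permutation_without_itertools_py : Prop := ∀ (candidates : List Int) (count : Int), Dom_make_permutation_without_itertools_py candidates count → Pre_make_permutation_without_itertools_py candidates count → Spec_make_permutation_without_itertools_py candidates count (make_permutation_without_itertools_py candidates count)



-- ===== LEMMAS AND PROOFS =====

lemma pvFlattenMapSingleton {α β : Type} (l : List α) (f : α → β) :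
    (l.map (fun x => [f x])).flatten = l.map f := by
  induction l with
  | nil => rfl
  | cons x xs ih => simp [ih]

-- A's level step is a flatMap of per-item child lists
lemma pvStepA_eq (queue : List (List Int × List Int)) :
    pvStepA queue
      = queue.flatMap (fun it => (PySem.Set.ofList it.2).map
          (fun c => (it.1 ++ [c], ((PySem.List.remove? it.2 c).getD it.2)))) := by
  unfold pvStepA
  simp [List.flatMap_def, pvFlattenMapSingleton]

-- children of an item have remaining lists one element shorter
lemma pvChild_len (it : List Int × List Int) (c : Int) (hm : c ∈ (PySem.Set.ofList it.2)) :
    ((PySem.List.remove? it.2 c).getD it.2).length = it.2.length - 1 := by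
  have hm' : c ∈ it.2 := (PySem.Set.mem_ofList it.2 c).mp hm
  rw [PySem.List.remove?_eq_some_erase it.2 c hm']
  simp [List.length_erase_of_mem hm']

-- BFS from a uniform-depth queue = concatenation of the DFS results of its items
lemma pvLoop_eq_flatMap_rec (candidates : List Int) (count : Int)
    (hpre : 0 ≤ (candidates.length : Int) - count) :
    ∀ (fuel r : Nat) (queue : List (List Int × List Int)), queue ≠ [] →
      (∀ it ∈ queue, it.2.length = r) → r < fuel →
      (pvLoopA candidates count (fuel + 1) queue).map Prod.fst
        = queue.flatMap (fun it =>
            pvRecB ((candidates.length : Int) - count) fuel it.1 it.2) := by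
  intro fuel
  induction fuel with
  | zero => intro r queue _ _ hlt; omega
  | succ f ih =>
    intro r queue hne hlen hlt
    obtain ⟨it0, rest, rfl⟩ := List.exists_cons_of_ne_nil hne
    rw [pvLoopA]
    simp only [List.head?_cons]
    by_cases hc : PySem.List.len it0.2 > PySem.List.len candidates - count
    · rw [if_pos hc]
      have h0 := hlen it0 (List.mem_cons_self ..)
      have hcr : ((candidates.length : Int) - count) < (r : Int) := by
        simp [PySem.List.len_eq, h0] at hc
        omega
      have hr1 : 1 ≤ r := by omega
      have hlen' : ∀ it ∈ pvStepA (it0 :: rest), it.2.length = r - 1 := by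
        intro it hmem
        rw [pvStepA_eq] at hmem
        obtain ⟨p, hp, hit⟩ := List.mem_flatMap.mp hmem
        obtain ⟨c, hcm, rfl⟩ := List.mem_map.mp hit
        simp only
        rw [pvChild_len p c hcm, hlen p hp]
      have hne' : pvStepA (it0 :: rest) ≠ [] := by
        rw [pvStepA_eq]
        have h0 := hlen it0 (List.mem_cons_self ..)
        have : it0.2 ≠ [] := by
          intro h; rw [h] at h0; simp at h0; omega
        obtain ⟨y, ys, hy⟩ := List.exists_cons_of_ne_nil this
        have hym : y ∈ PySem.Set.ofList it0.2 := by
          rw [PySem.Set.mem_ofList, hy]; exact List.mem_cons_self ..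
        intro hcontra
        have : ((it0.1 ++ [y], ((PySem.List.remove? it0.2 y).getD it0.2))) ∈ ([] : List (List Int × List Int)) := by
          rw [← hcontra]
          exact List.mem_flatMap.mpr ⟨it0, List.mem_cons_self .., List.mem_map.mpr ⟨y, hym, rfl⟩⟩
        simp at this
      rw [ih (r - 1) (pvStepA (it0 :: rest)) hne' hlen' (by omega)]
      -- now: flatMap over the step = flatMap of the unfolded pvRecB (f+1)
      rw [pvStepA_eq, List.flatMap_assoc]
      apply List.flatMap_congr
      intro it hit
      rw [List.flatMap_map]
      have hlit := hlen it hit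
      rw [pvRecB]
      rw [if_neg (by simp [PySem.List.len_eq, hlit]; omega)]
      rw [PySem.List.foldl_append_eq_flatMap]
      rfl
    · rw [if_neg hc]
      have h0 := hlen it0 (List.mem_cons_self ..)
      have hle : (r : Int) ≤ (candidates.length : Int) - count := by
        simp [PySem.List.len_eq, h0] at hc
        omega
      -- each pvRecB (f+1) returns [chosen]
      have : ∀ q : List (List Int × List Int), (∀ it ∈ q, it.2.length = r) →
          q.flatMap (fun it => pvRecB ((candidates.length : Int) - count) (f + 1) it.1 it.2) = q.map Prod.fst := by
        intro q
        induction q with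
        | nil => intro _; rfl
        | cons x xs ihq =>
          intro hq
          have hx := hq x (List.mem_cons_self ..)
          rw [List.flatMap_cons, List.map_cons, ihq (fun it h => hq it (List.mem_cons_of_mem _ h))]
          rw [pvRecB]
          rw [if_pos (by simp [PySem.List.len_eq, hx]; omega)]
          rfl
      rw [this _ hlen]

-- ===== VERDICT (by name: the statement is the Claim_ definition above) =====
theorem make_permutation_without_itertools_py_spec : Claim_equal_make_permutation_without_itertools_py := by
  intro candidates count hdom hpre
  unfold Spec_make_permutation_without_itertools_py
  unfold make_permutation_without_itertools_py make_permutation_without_itertools_py_alt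
  unfold Pre_make_permutation_without_itertools_py at hpre
  rw [show candidates.length + 2 = (candidates.length + 1) + 1 from rfl]
  rw [pvLoop_eq_flatMap_rec candidates count (by omega) (candidates.length + 1) candidates.length
      [([], candidates)] (by simp) (by intro it h; simp at h; rw [h]) (by omega)]
  simp [PySem.List.len_eq]
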